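-- pv_equiv track=rewrite | github.com/Kimluur/Vialis-1-Verkeersimulatie | Guy/wachtrij.py | tel_deact
-- ===== SOURCE A (Python) =====
-- def tel_deact(serie):
--     """
--     Counts amount of cars from a serie when there is an activation.
--     When the sensor then turns off there is a car added.
--     :param serie:
--     :return:
--     """
--     act = False
--     cars = 0
--     for row in serie:
--         if row == "|" and act == False:
--             act = True
--         elif row != "|" and act == True:
--             act = False
--             cars += 1
--     return cars
-- ===== SOURCE B (Python) =====
-- from itertools import groupby
--
-- def tel_deact(serie):
--     # Segment the series into maximal runs; each '|'-run that is not the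
--     # final run is followed by a non-'|' run, i.e. one counted car.
--     keys = [k for k, _ in groupby(serie, key=lambda row: row == "|")]
--     return sum(1 for k in keys[:-1] if k)
-- ===== Notes on version B (the rewrite author's own statement) =====
-- stated objective: idiomatic
-- what changed: B replaces the per-element activation-flag state machine by itertools.groupby run segmentation, counting the '|'-keyed runs that are not the final run.
import Mathlib
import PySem

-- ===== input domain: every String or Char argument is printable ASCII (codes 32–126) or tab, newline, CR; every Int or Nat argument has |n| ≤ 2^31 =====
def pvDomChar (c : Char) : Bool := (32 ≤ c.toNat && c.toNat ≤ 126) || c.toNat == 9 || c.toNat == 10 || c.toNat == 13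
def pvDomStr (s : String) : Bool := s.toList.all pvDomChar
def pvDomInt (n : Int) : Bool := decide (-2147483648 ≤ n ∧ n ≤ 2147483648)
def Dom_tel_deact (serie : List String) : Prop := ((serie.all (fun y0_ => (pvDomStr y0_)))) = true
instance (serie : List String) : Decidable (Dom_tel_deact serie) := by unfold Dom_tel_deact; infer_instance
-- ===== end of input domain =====

-- B counts cars by run segmentation (groupby) instead of A's activation-flag state machine; same O(n) cost, more idiomatic.

-- ===== PORT A =====
-- A: toggle an activation flag per element, counting on each '|'→non-'|' deactivation.
def tel_deact (serie : List String) : Int :=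
  (serie.foldl
    (fun (s : Bool × Int) row =>
      if row == "|" && s.1 == false then (true, s.2)
      else if row != "|" && s.1 == true then (false, s.2 + 1)
      else s)
    (false, 0)).2

-- ===== PORT B =====
-- groupby keys: adjacent-duplicate collapse of the per-element key (row == "|").
def collapseAdj : List Bool → List Bool
  | [] => []
  | [a] => [a]
  | a :: b :: t => if a = b then collapseAdj (b :: t) else a :: collapseAdj (b :: t)

def tel_deact_alt (serie : List String) : Int :=
  let keys := collapseAdj (serie.map (fun row => row == "|"))
  ((keys.dropLast.countP (fun k => k)) : Int)

-- ===== PRECONDITION & SPEC =====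
def Spec_tel_deact (serie : List String) (out : Int) : Prop := out = tel_deact_alt serie
instance (serie : List String) (out : Int) : Decidable (Spec_tel_deact serie out) := by unfold Spec_tel_deact; infer_instance

-- ===== CLAIM (what is proved, stated in full; the proofs are below) =====
def Claim_equal_tel_deact : Prop := ∀ (serie : List String), Dom_tel_deact serie → Spec_tel_deact serie (tel_deact serie)

-- ===== LEMMAS AND PROOFS =====

-- transition count with previous key `act`
def fcnt : Bool → List Bool → Int
  | _, [] => 0
  | act, b :: t => (if act && !b then 1 else 0) + fcnt b t

theorem foldl_eq_fcnt (rs : List String) (act : Bool) (cars : Int) :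
    (rs.foldl
      (fun (s : Bool × Int) row =>
        if row == "|" && s.1 == false then (true, s.2)
        else if row != "|" && s.1 == true then (false, s.2 + 1)
        else s)
      (act, cars)).2 = cars + fcnt act (rs.map (fun row => row == "|")) := by
  induction rs generalizing act cars with
  | nil => simp [fcnt]
  | cons r rs ih =>
    rw [List.foldl_cons, List.map_cons]
    have hstep : (if r == "|" && (act, cars).1 == false then ((true : Bool), (act, cars).2)
        else if r != "|" && (act, cars).1 == true then (false, (act, cars).2 + 1)
        else (act, cars))
        = ((r == "|"), cars + (if act && !(r == "|") then 1 else 0)) := by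
      by_cases h : r = "|" <;> cases act <;> simp [h]
    rw [hstep, ih, fcnt]
    ring

theorem collapseAdj_ne_nil (b : Bool) (t : List Bool) : collapseAdj (b :: t) ≠ [] := by
  induction t generalizing b with
  | nil => simp [collapseAdj]
  | cons c t ih =>
    by_cases h : b = c <;> simp [collapseAdj, h, ih]

theorem fcnt_eq_collapse (t : List Bool) (b : Bool) :
    fcnt b t = (((collapseAdj (b :: t)).dropLast.countP (fun k => k)) : Int) := by
  induction t generalizing b with
  | nil => simp [fcnt, collapseAdj]
  | cons c t ih =>
    by_cases h : b = c
    · subst h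
      have hb : (b && !b) = false := by cases b <;> simp
      simp [fcnt, collapseAdj, hb, ih]
    · have hne := collapseAdj_ne_nil c t
      rw [show collapseAdj (b :: c :: t) = b :: collapseAdj (c :: t) from by
        simp [collapseAdj, h]]
      rw [List.dropLast_cons_of_ne_nil hne]
      have : (b && !c) = b := by cases b <;> cases c <;> simp_all
      simp [fcnt, this, ih, List.countP_cons]
      cases b <;> simp <;> ring

-- ===== VERDICT (by name: the statement is the Claim_ definition above) =====
theorem tel_deact_spec : Claim_equal_tel_deact := by
  intro serie _
  show tel_deact serie = tel_deact_alt serie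
  unfold tel_deact tel_deact_alt
  rw [foldl_eq_fcnt]
  cases h : serie.map (fun row => row == "|") with
  | nil => simp [fcnt, collapseAdj]
  | cons b t =>
    have : fcnt false (b :: t) = fcnt b t := by simp [fcnt]
    simp [this, fcnt_eq_collapse]
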